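-- pv_equiv track=rewrite | github.com/SebastianBoehler/tue-api-wrapper | package/src/tue_api_wrapper/fitness_client.py | _digit_bounds
-- ===== SOURCE A (Python) =====
-- def _digit_bounds(mask: list[list[bool]]) -> list[tuple[int, int, int, int]]:
--     height = len(mask)
--     width = len(mask[0]) if height else 0
--     occupied_columns = [any(mask[y][x] for y in range(height)) for x in range(width)]
--     bounds: list[tuple[int, int, int, int]] = []
--     column = 0
--     while column < width:
--         while column < width and not occupied_columns[column]:
--             column += 1
--         start = column
--         while column < width and occupied_columns[column]:
--             column += 1
--         if start == column:
--             continue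
--         end = column - 1
--         rows = [y for y in range(height) for x in range(start, end + 1) if mask[y][x]]
--         columns = [x for y in range(height) for x in range(start, end + 1) if mask[y][x]]
--         bounds.append((min(columns), min(rows), max(columns) + 1, max(rows) + 1))
--     return bounds
-- ===== SOURCE B (Python) =====
-- def _digit_bounds(mask: list[list[bool]]) -> list[tuple[int, int, int, int]]:
--     height = len(mask)
--     width = len(mask[0]) if height else 0
--     # one scan per column: (min occupied row, max occupied row) or None
--     col_info = []
--     for x in range(width):
--         ys = [y for y in range(height) if mask[y][x]]
--         col_info.append((min(ys), max(ys)) if ys else None)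
--     bounds: list[tuple[int, int, int, int]] = []
--     run = None  # (start_column, row_min, row_max) of the current occupied run
--     for x in range(width):
--         info = col_info[x]
--         if info is not None:
--             lo, hi = info
--             if run is None:
--                 run = (x, lo, hi)
--             else:
--                 run = (run[0], min(run[1], lo), max(run[2], hi))
--         elif run is not None:
--             bounds.append((run[0], run[1], x, run[2] + 1))
--             run = None
--     if run is not None:
--         bounds.append((run[0], run[1], width, run[2] + 1))
--     return bounds
-- ===== Notes on version B (the rewrite author's own statement) =====
-- stated objective: simpler
-- what changed: Replaces A's three nested while-loops plus two per-segment double-comprehension rescans of the mask by one per-column min/max table and a single left-to-right fold that grows a run (start,row_min,row_max) and emits a box when the run ends.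
import Mathlib
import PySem

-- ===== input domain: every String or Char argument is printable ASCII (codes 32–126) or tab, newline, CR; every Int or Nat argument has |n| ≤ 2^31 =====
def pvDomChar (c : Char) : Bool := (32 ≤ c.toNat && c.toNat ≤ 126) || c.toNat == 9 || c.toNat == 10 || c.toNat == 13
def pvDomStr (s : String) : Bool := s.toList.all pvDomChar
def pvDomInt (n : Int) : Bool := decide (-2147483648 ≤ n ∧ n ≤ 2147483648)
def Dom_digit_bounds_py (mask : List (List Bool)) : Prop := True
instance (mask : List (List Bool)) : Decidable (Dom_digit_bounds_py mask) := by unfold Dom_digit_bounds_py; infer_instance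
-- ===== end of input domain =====

-- B replaces A's three while-loops plus per-segment double-comprehension rescans by a
-- per-column min/max table and one left-to-right fold that grows and emits runs (objective: simpler).

-- ===== PORT A =====
-- mask[y][x]: under Pre_ every index used is in range, so getD is exact
def pvCell (mask : List (List Bool)) (y x : Nat) : Bool :=
  (mask.getD y []).getD x false

-- width = len(mask[0]) if height else 0
def pvWidth (mask : List (List Bool)) : Nat :=
  match mask with
  | [] => 0
  | r :: _ => r.length

-- occupied_columns = [any(mask[y][x] for y in range(height)) for x in range(width)]
def pvOcc (mask : List (List Bool)) : List Bool :=
  (List.range (pvWidth mask)).map (fun x =>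
    (List.range mask.length).any (fun y => pvCell mask y x))

-- Python min/max of a nonempty list; the `none` (empty) case is unreachable in A
def pyMinNat (l : List Nat) : Nat := (PySem.List.min? l (fun y => y)).getD 0
def pyMaxNat (l : List Nat) : Nat := (PySem.List.max? l (fun y => y)).getD 0

-- `while column < width and not occupied_columns[column]: column += 1`
def pvSkip (occ : List Bool) (width c : Nat) : Nat :=
  if c < width ∧ ¬ occ.getD c false then pvSkip occ width (c + 1) else c
termination_by width - c
decreasing_by omega

-- `while column < width and occupied_columns[column]: column += 1`
def pvTake (occ : List Bool) (width c : Nat) : Nat :=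
  if c < width ∧ occ.getD c false then pvTake occ width (c + 1) else c
termination_by width - c
decreasing_by omega

-- rows = [y for y in range(height) for x in range(start, end + 1) if mask[y][x]]
def pvRowsList (mask : List (List Bool)) (s e : Nat) : List Nat :=
  (List.range mask.length).flatMap (fun y =>
    ((List.range' s (e + 1 - s)).filter (fun x => pvCell mask y x)).map (fun _ => y))

-- columns = [x for y in range(height) for x in range(start, end + 1) if mask[y][x]]
def pvColsList (mask : List (List Bool)) (s e : Nat) : List Nat :=
  (List.range mask.length).flatMap (fun y =>
    (List.range' s (e + 1 - s)).filter (fun x => pvCell mask y x))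

-- (min(columns), min(rows), max(columns) + 1, max(rows) + 1)
def pvSeg (mask : List (List Bool)) (s e : Nat) : Int × Int × Int × Int :=
  ((pyMinNat (pvColsList mask s e) : Int), (pyMinNat (pvRowsList mask s e) : Int),
   (pyMaxNat (pvColsList mask s e) : Int) + 1, (pyMaxNat (pvRowsList mask s e) : Int) + 1)

theorem pvSkip_ge (occ : List Bool) (width c : Nat) : c ≤ pvSkip occ width c := by
  unfold pvSkip
  split
  · have := pvSkip_ge occ width (c + 1); omega
  · exact Nat.le_refl c
termination_by width - c
decreasing_by omega

theorem pvTake_ge (occ : List Bool) (width c : Nat) : c ≤ pvTake occ width c := by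
  unfold pvTake
  split
  · have := pvTake_ge occ width (c + 1); omega
  · exact Nat.le_refl c
termination_by width - c
decreasing_by omega

-- the outer `while column < width` loop
def pvOuter (mask : List (List Bool)) (occ : List Bool) (width c : Nat) :
    List (Int × Int × Int × Int) :=
  if c < width then
    if pvSkip occ width c = pvTake occ width (pvSkip occ width c) then []
    else
      pvSeg mask (pvSkip occ width c) (pvTake occ width (pvSkip occ width c) - 1)
        :: pvOuter mask occ width (pvTake occ width (pvSkip occ width c))
  else []
termination_by width - c
decreasing_by
  have h1 := pvSkip_ge occ width c
  have h2 := pvTake_ge occ width (pvSkip occ width c)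
  omega

def digit_bounds_py (mask : List (List Bool)) : List (Int × Int × Int × Int) :=
  pvOuter mask (pvOcc mask) (pvWidth mask) 0

-- ===== PORT B =====
-- ys = [y for y in range(height) if mask[y][x]]; (min(ys), max(ys)) if ys else None
def pvColInfo (mask : List (List Bool)) (x : Nat) : Option (Nat × Nat) :=
  let ys := (List.range mask.length).filter (fun y => pvCell mask y x)
  if ys.isEmpty then none else some (pyMinNat ys, pyMaxNat ys)

-- one iteration of B's for-loop; state = (bounds, run)
def pvStep (infos : List (Option (Nat × Nat)))
    (st : List (Int × Int × Int × Int) × Option (Nat × Nat × Nat)) (x : Nat) :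
    List (Int × Int × Int × Int) × Option (Nat × Nat × Nat) :=
  match infos.getD x none with
  | some (lo, hi) =>
    match st.2 with
    | none => (st.1, some (x, lo, hi))
    | some (s, l0, h0) => (st.1, some (s, min l0 lo, max h0 hi))
  | none =>
    match st.2 with
    | none => st
    | some (s, l0, h0) => (st.1 ++ [((s : Int), (l0 : Int), (x : Int), (h0 : Int) + 1)], none)

def digit_bounds_py_alt (mask : List (List Bool)) : List (Int × Int × Int × Int) :=
  let width := pvWidth mask
  let infos := (List.range width).map (fun x => pvColInfo mask x)
  let st := (List.range width).foldl (pvStep infos) ([], none)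
  match st.2 with
  | none => st.1
  | some (s, l0, h0) => st.1 ++ [((s : Int), (l0 : Int), (width : Int), (h0 : Int) + 1)]

-- ===== PRECONDITION & SPEC =====
-- Pre_ excludes exactly the ragged masks (some row shorter than mask[0]) on which the
-- Python A raises IndexError; A returns normally on every other input.
def Pre_digit_bounds_py (mask : List (List Bool)) : Prop :=
  ∀ r ∈ mask, pvWidth mask ≤ r.length
instance (mask : List (List Bool)) : Decidable (Pre_digit_bounds_py mask) := by
  unfold Pre_digit_bounds_py; infer_instance

def pvWitness_digit_bounds_py : List (List Bool) := [[true, false], [false, true]]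

def Spec_digit_bounds_py (mask : List (List Bool)) (out : List (Int × Int × Int × Int)) : Prop := out = digit_bounds_py_alt mask
instance (mask : List (List Bool)) (out : List (Int × Int × Int × Int)) : Decidable (Spec_digit_bounds_py mask out) := by unfold Spec_digit_bounds_py; infer_instance

-- ===== CLAIM (what is proved, stated in full; the proofs are below) =====
def Claim_equal_digit_bounds_py : Prop := ∀ (mask : List (List Bool)), Dom_digit_bounds_py mask → Pre_digit_bounds_py mask → Spec_digit_bounds_py mask (digit_bounds_py mask)

-- ===== LEMMAS AND PROOFS =====

-- B's fold, rewritten as structural recursion on the column index (proof-side only)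
def pvBRun (mask : List (List Bool)) (width c : Nat) (r : Option (Nat × Nat × Nat)) :
    List (Int × Int × Int × Int) :=
  if c < width then
    match pvColInfo mask c, r with
    | some (m, M), none => pvBRun mask width (c + 1) (some (c, m, M))
    | some (m, M), some (s, l0, h0) => pvBRun mask width (c + 1) (some (s, min l0 m, max h0 M))
    | none, none => pvBRun mask width (c + 1) none
    | none, some (s, l0, h0) =>
        ((s : Int), (l0 : Int), (c : Int), (h0 : Int) + 1) :: pvBRun mask width (c + 1) none
  else
    match r with
    | none => []
    | some (s, l0, h0) => [((s : Int), (l0 : Int), (width : Int), (h0 : Int) + 1)]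
termination_by width - c

-- the final `if run is not None` flush of B
def pvFlush (width : Nat) (st : List (Int × Int × Int × Int) × Option (Nat × Nat × Nat)) :
    List (Int × Int × Int × Int) :=
  match st.2 with
  | none => st.1
  | some (s, l0, h0) => st.1 ++ [((s : Int), (l0 : Int), (width : Int), (h0 : Int) + 1)]

theorem pvB_fold (mask : List (List Bool)) (width : Nat) :
    ∀ (n c : Nat) (r : Option (Nat × Nat × Nat)) (acc : List (Int × Int × Int × Int)),
    width - c ≤ n →
    pvFlush width ((List.range' c (width - c)).foldl
        (pvStep ((List.range width).map (fun x => pvColInfo mask x))) (acc, r))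
    = acc ++ pvBRun mask width c r := by
  intro n
  induction n with
  | zero =>
    intro c r acc h
    have h0 : width - c = 0 := by omega
    have hcw : ¬ c < width := by omega
    rw [h0, pvBRun.eq_def, if_neg hcw]
    rcases r with _ | ⟨s, l0, h0⟩ <;> simp [pvFlush]
  | succ n ih =>
    intro c r acc h
    rcases Nat.lt_or_ge c width with hcw | hcw
    · have hinfo : ((List.range width).map (fun x => pvColInfo mask x)).getD c none
          = pvColInfo mask c := by
        simp [List.getD, hcw]
      have hrange : width - c = (width - (c + 1)) + 1 := by omega
      rw [hrange, List.range'_succ, List.foldl_cons]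
      rcases hC : pvColInfo mask c with _ | ⟨m, M⟩ <;>
        rcases r with _ | ⟨s, l0, h0⟩ <;>
        rw [pvBRun.eq_def, if_pos hcw, hC]
      · have hstep : pvStep ((List.range width).map (fun x => pvColInfo mask x)) (acc, none) c
            = (acc, none) := by
          rw [pvStep.eq_def, hinfo, hC]
        rw [hstep]
        exact ih (c + 1) none acc (by omega)
      · have hstep : pvStep ((List.range width).map (fun x => pvColInfo mask x))
            (acc, some (s, l0, h0)) c
            = (acc ++ [((s : Int), (l0 : Int), (c : Int), (h0 : Int) + 1)], none) := by
          rw [pvStep.eq_def, hinfo, hC]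
        rw [hstep]
        rw [ih (c + 1) none (acc ++ [((s : Int), (l0 : Int), (c : Int), (h0 : Int) + 1)]) (by omega)]
        simp
      · have hstep : pvStep ((List.range width).map (fun x => pvColInfo mask x)) (acc, none) c
            = (acc, some (c, m, M)) := by
          rw [pvStep.eq_def, hinfo, hC]
        rw [hstep]
        exact ih (c + 1) (some (c, m, M)) acc (by omega)
      · have hstep : pvStep ((List.range width).map (fun x => pvColInfo mask x))
            (acc, some (s, l0, h0)) c
            = (acc, some (s, min l0 m, max h0 M)) := by
          rw [pvStep.eq_def, hinfo, hC]
        rw [hstep]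
        exact ih (c + 1) (some (s, min l0 m, max h0 M)) acc (by omega)
    · have h0 : width - c = 0 := by omega
      rw [h0, pvBRun.eq_def, if_neg (by omega : ¬ c < width)]
      rcases r with _ | ⟨s, l0, h0⟩ <;> simp [pvFlush]

theorem alt_eq_pvBRun (mask : List (List Bool)) :
    digit_bounds_py_alt mask = pvBRun mask (pvWidth mask) 0 none := by
  have h := pvB_fold mask (pvWidth mask) (pvWidth mask) 0 none [] (by omega)
  rw [Nat.sub_zero, ← List.range_eq_range'] at h
  simp only [List.nil_append] at h
  rw [← h]
  rfl

theorem pyMinNat_spec (l : List Nat) (h : l ≠ []) :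
    pyMinNat l ∈ l ∧ ∀ y ∈ l, pyMinNat l ≤ y := by
  unfold pyMinNat
  cases hm : PySem.List.min? l (fun y => y) with
  | none => exact absurd ((PySem.List.min?_eq_none_iff l _).mp hm) h
  | some m =>
    refine ⟨by simpa using PySem.List.min?_mem hm, ?_⟩
    intro y hy; simpa using PySem.List.min?_isMin hm y hy

theorem pyMaxNat_spec (l : List Nat) (h : l ≠ []) :
    pyMaxNat l ∈ l ∧ ∀ y ∈ l, y ≤ pyMaxNat l := by
  unfold pyMaxNat
  cases hm : PySem.List.max? l (fun y => y) with
  | none => exact absurd ((PySem.List.max?_eq_none_iff l _).mp hm) h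
  | some m =>
    refine ⟨by simpa using PySem.List.max?_mem hm, ?_⟩
    intro y hy; simpa using PySem.List.max?_isMax hm y hy

theorem pyMinNat_unique (l : List Nat) (a : Nat) (ha : a ∈ l) (hb : ∀ y ∈ l, a ≤ y) :
    pyMinNat l = a := by
  have h : l ≠ [] := by intro h; subst h; simp at ha
  have hs := pyMinNat_spec l h
  exact Nat.le_antisymm (hs.2 a ha) (hb _ hs.1)

theorem pyMaxNat_unique (l : List Nat) (a : Nat) (ha : a ∈ l) (hb : ∀ y ∈ l, y ≤ a) :
    pyMaxNat l = a := by
  have h : l ≠ [] := by intro h; subst h; simp at ha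
  have hs := pyMaxNat_spec l h
  exact Nat.le_antisymm (hb _ hs.1) (hs.2 a ha)

theorem pvColInfo_some (mask : List (List Bool)) (x m M : Nat)
    (h : pvColInfo mask x = some (m, M)) :
    (m < mask.length ∧ pvCell mask m x = true) ∧
    (M < mask.length ∧ pvCell mask M x = true) ∧
    (∀ y, y < mask.length → pvCell mask y x = true → m ≤ y ∧ y ≤ M) := by
  simp only [pvColInfo] at h
  split at h
  · exact absurd h (by simp)
  · rename_i hne
    rw [List.isEmpty_iff] at hne
    obtain ⟨hm, hM⟩ := Prod.mk.injEq .. ▸ (Option.some.injEq .. ▸ h : (pyMinNat _, pyMaxNat _) = (m, M))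
    have hmin := pyMinNat_spec _ hne
    have hmax := pyMaxNat_spec _ hne
    rw [hm] at hmin
    rw [hM] at hmax
    have h1 := List.mem_filter.mp hmin.1
    have h2 := List.mem_filter.mp hmax.1
    refine ⟨⟨List.mem_range.mp h1.1, h1.2⟩, ⟨List.mem_range.mp h2.1, h2.2⟩, ?_⟩
    intro y hy hc
    have hmem : y ∈ (List.range mask.length).filter (fun y => pvCell mask y x) :=
      List.mem_filter.mpr ⟨List.mem_range.mpr hy, hc⟩
    exact ⟨hmin.2 y hmem, hmax.2 y hmem⟩

theorem pvColInfo_isSome_iff (mask : List (List Bool)) (x : Nat) :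
    (pvColInfo mask x).isSome = true ↔ ∃ y, y < mask.length ∧ pvCell mask y x = true := by
  simp only [pvColInfo]
  split
  · rename_i h
    simp only [Option.isSome_none, Bool.false_eq_true, false_iff]
    rw [List.isEmpty_iff, List.filter_eq_nil_iff] at h
    rintro ⟨y, hy, hc⟩
    exact absurd hc (by simpa using h y (List.mem_range.mpr hy))
  · rename_i h
    simp only [Option.isSome_some, true_iff]
    rw [List.isEmpty_iff] at h
    obtain ⟨y, hy⟩ := List.exists_mem_of_ne_nil _ h
    have := List.mem_filter.mp hy
    exact ⟨y, List.mem_range.mp this.1, this.2⟩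

theorem pvOcc_getD (mask : List (List Bool)) (x : Nat) (hx : x < pvWidth mask) :
    (pvOcc mask).getD x false = (pvColInfo mask x).isSome := by
  have h1 : (pvOcc mask).getD x false
      = ((List.range mask.length).any fun y => pvCell mask y x) := by
    simp [pvOcc, List.getD, List.getElem?_map, List.getElem?_range, hx]
  rw [h1, Bool.eq_iff_iff, List.any_eq_true, pvColInfo_isSome_iff]
  simp only [List.mem_range]

theorem mem_pvColsList (mask : List (List Bool)) (s e x : Nat) :
    x ∈ pvColsList mask s e ↔
      (∃ y, y < mask.length ∧ pvCell mask y x = true) ∧ s ≤ x ∧ x < s + (e + 1 - s) := by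
  simp only [pvColsList, List.mem_flatMap, List.mem_filter, List.mem_range, List.mem_range'_1]
  tauto

theorem mem_pvRowsList (mask : List (List Bool)) (s e y : Nat) :
    y ∈ pvRowsList mask s e ↔
      y < mask.length ∧ ∃ x, s ≤ x ∧ x < s + (e + 1 - s) ∧ pvCell mask y x = true := by
  simp only [pvRowsList, List.mem_flatMap, List.mem_map, List.mem_filter, List.mem_range,
    List.mem_range'_1]
  constructor
  · rintro ⟨y', hy', x, ⟨⟨hx1, hx2⟩, hc⟩, rfl⟩
    exact ⟨hy', x, hx1, hx2, hc⟩
  · rintro ⟨hy, x, hx1, hx2, hc⟩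
    exact ⟨y, hy, x, ⟨⟨hx1, hx2⟩, hc⟩, rfl⟩

-- the run invariant carried through B's fold
def pvRV (mask : List (List Bool)) (s c lo hi : Nat) : Prop :=
  (∀ x, s ≤ x → x < c → ∃ m M, pvColInfo mask x = some (m, M) ∧ lo ≤ m ∧ M ≤ hi) ∧
  (∃ x, s ≤ x ∧ x < c ∧ ∃ M, pvColInfo mask x = some (lo, M)) ∧
  (∃ x, s ≤ x ∧ x < c ∧ ∃ m, pvColInfo mask x = some (m, hi))

theorem pvSeg_eq (mask : List (List Bool)) (s c lo hi : Nat) (hsc : s < c)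
    (hrv : pvRV mask s c lo hi) :
    pvSeg mask s (c - 1) = ((s : Int), (lo : Int), (c : Int), (hi : Int) + 1) := by
  obtain ⟨h1, ⟨x1, hx1a, hx1b, M1, hx1⟩, ⟨x2, hx2a, hx2b, m2, hx2⟩⟩ := hrv
  obtain ⟨m0, M0, hs0, -, -⟩ := h1 s (Nat.le_refl s) hsc
  have hs0' := pvColInfo_some mask s m0 M0 hs0
  obtain ⟨m3, M3, he0, -, -⟩ := h1 (c - 1) (by omega) (by omega)
  have he0' := pvColInfo_some mask (c - 1) m3 M3 he0
  have hminC : pyMinNat (pvColsList mask s (c - 1)) = s := by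
    apply pyMinNat_unique
    · rw [mem_pvColsList]; exact ⟨⟨m0, hs0'.1.1, hs0'.1.2⟩, Nat.le_refl s, by omega⟩
    · intro y hy; rw [mem_pvColsList] at hy; exact hy.2.1
  have hmaxC : pyMaxNat (pvColsList mask s (c - 1)) = c - 1 := by
    apply pyMaxNat_unique
    · rw [mem_pvColsList]; exact ⟨⟨m3, he0'.1.1, he0'.1.2⟩, by omega, by omega⟩
    · intro y hy; rw [mem_pvColsList] at hy; omega
  have hminR : pyMinNat (pvRowsList mask s (c - 1)) = lo := by
    apply pyMinNat_unique
    · rw [mem_pvRowsList]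
      have h1' := pvColInfo_some mask x1 lo M1 hx1
      exact ⟨h1'.1.1, x1, hx1a, by omega, h1'.1.2⟩
    · intro y hy; rw [mem_pvRowsList] at hy
      obtain ⟨hylen, x, hxa, hxb, hcell⟩ := hy
      obtain ⟨m', M', hinfo, hlom, -⟩ := h1 x hxa (by omega)
      have := (pvColInfo_some mask x m' M' hinfo).2.2 y hylen hcell
      omega
  have hmaxR : pyMaxNat (pvRowsList mask s (c - 1)) = hi := by
    apply pyMaxNat_unique
    · rw [mem_pvRowsList]
      have h2' := pvColInfo_some mask x2 m2 hi hx2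
      exact ⟨h2'.2.1.1, x2, hx2a, by omega, h2'.2.1.2⟩
    · intro y hy; rw [mem_pvRowsList] at hy
      obtain ⟨hylen, x, hxa, hxb, hcell⟩ := hy
      obtain ⟨m', M', hinfo, -, hMhi⟩ := h1 x hxa (by omega)
      have := (pvColInfo_some mask x m' M' hinfo).2.2 y hylen hcell
      omega
  have hc1 : ((c - 1 : Nat) : Int) + 1 = (c : Int) := by omega
  simp only [pvSeg, hminC, hmaxC, hminR, hmaxR, hc1]

theorem pvRV_extend (mask : List (List Bool)) (s c lo hi m M : Nat)
    (hrv : pvRV mask s c lo hi) (hc : pvColInfo mask c = some (m, M)) :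
    pvRV mask s (c + 1) (min lo m) (max hi M) := by
  obtain ⟨h1, ⟨x1, hx1a, hx1b, M1, hx1⟩, ⟨x2, hx2a, hx2b, m2, hx2⟩⟩ := hrv
  refine ⟨?_, ?_, ?_⟩
  · intro x hx hxc
    rcases Nat.lt_or_ge x c with h | h
    · obtain ⟨m', M', hi1, hi2, hi3⟩ := h1 x hx h
      exact ⟨m', M', hi1, Nat.le_trans (Nat.min_le_left ..) hi2,
        Nat.le_trans hi3 (Nat.le_max_left ..)⟩
    · have hxeq : x = c := by omega
      subst hxeq
      exact ⟨m, M, hc, Nat.min_le_right .., Nat.le_max_right ..⟩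
  · rcases Nat.le_total lo m with h | h
    · exact ⟨x1, hx1a, by omega, M1, by rw [hx1, Nat.min_eq_left h]⟩
    · exact ⟨c, by omega, by omega, M, by rw [hc, Nat.min_eq_right h]⟩
  · rcases Nat.le_total M hi with h | h
    · exact ⟨x2, hx2a, by omega, m2, by rw [hx2, Nat.max_eq_left h]⟩
    · exact ⟨c, by omega, by omega, m, by rw [hc, Nat.max_eq_right h]⟩

theorem pvRV_init (mask : List (List Bool)) (c m M : Nat)
    (hc : pvColInfo mask c = some (m, M)) : pvRV mask c (c + 1) m M := by
  refine ⟨?_, ⟨c, by omega, by omega, M, hc⟩, ⟨c, by omega, by omega, m, hc⟩⟩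
  intro x hx hxc
  have hxeq : x = c := by omega
  subst hxeq
  exact ⟨m, M, hc, Nat.le_refl m, Nat.le_refl M⟩

theorem pvOuter_unocc (mask : List (List Bool)) (c : Nat)
    (hc : c < pvWidth mask) (ho : (pvOcc mask).getD c false = false) :
    pvOuter mask (pvOcc mask) (pvWidth mask) c
      = pvOuter mask (pvOcc mask) (pvWidth mask) (c + 1) := by
  have hskip : pvSkip (pvOcc mask) (pvWidth mask) c
      = pvSkip (pvOcc mask) (pvWidth mask) (c + 1) := by
    rw [pvSkip, ho]; simp [hc]
  rcases Nat.lt_or_ge (c + 1) (pvWidth mask) with h | h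
  · rw [pvOuter]
    conv_rhs => rw [pvOuter]
    simp only [if_pos hc, if_pos h, hskip]
  · have hw : pvWidth mask = c + 1 := by omega
    rw [pvOuter]
    conv_rhs => rw [pvOuter]
    rw [hw] at hskip ⊢
    have hs1 : pvSkip (pvOcc mask) (c + 1) (c + 1) = c + 1 := by
      rw [pvSkip]; simp
    have ht1 : pvTake (pvOcc mask) (c + 1) (c + 1) = c + 1 := by
      rw [pvTake]; simp
    simp [hskip, hs1, ht1]

theorem pvMain (mask : List (List Bool)) :
    ∀ (n c : Nat), pvWidth mask - c ≤ n → c ≤ pvWidth mask →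
    (pvOuter mask (pvOcc mask) (pvWidth mask) c = pvBRun mask (pvWidth mask) c none) ∧
    (∀ s lo hi, s < c →
      (∀ x, s ≤ x → x < c → (pvOcc mask).getD x false = true) →
      pvRV mask s c lo hi →
      pvSeg mask s (pvTake (pvOcc mask) (pvWidth mask) c - 1)
          :: pvOuter mask (pvOcc mask) (pvWidth mask) (pvTake (pvOcc mask) (pvWidth mask) c)
        = pvBRun mask (pvWidth mask) c (some (s, lo, hi))) := by
  intro n
  induction n with
  | zero =>
    intro c h hle
    have hcw : ¬ c < pvWidth mask := by omega
    constructor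
    · rw [pvOuter, if_neg hcw, pvBRun.eq_def, if_neg hcw]
    · intro s lo hi hs hocc hrv
      have hcw' : c = pvWidth mask := by omega
      have htake : pvTake (pvOcc mask) (pvWidth mask) c = c := by
        rw [pvTake]; simp [hcw]
      rw [pvBRun.eq_def, if_neg hcw, htake]
      rw [pvOuter, if_neg hcw]
      rw [pvSeg_eq mask s c lo hi hs hrv]
      rw [hcw']
  | succ n ih =>
    intro c h hle
    rcases Nat.lt_or_ge c (pvWidth mask) with hcw | hcw
    · constructor
      · cases hb : (pvOcc mask).getD c false with
        | false =>
          have hCnone : pvColInfo mask c = none := by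
            have hcc := pvOcc_getD mask c hcw
            rw [hb] at hcc
            cases hC : pvColInfo mask c with
            | none => rfl
            | some p => rw [hC] at hcc; simp at hcc
          rw [pvOuter_unocc mask c hcw hb]
          rw [pvBRun.eq_def, if_pos hcw, hCnone]
          exact (ih (c + 1) (by omega) (by omega)).1
        | true =>
          have hCsome : ∃ m M, pvColInfo mask c = some (m, M) := by
            have hcc := pvOcc_getD mask c hcw
            rw [hb] at hcc
            cases hC : pvColInfo mask c with
            | none => rw [hC] at hcc; simp at hcc
            | some p => exact ⟨p.1, p.2, by rw [← hC]⟩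
          obtain ⟨m, M, hC⟩ := hCsome
          have hskip : pvSkip (pvOcc mask) (pvWidth mask) c = c := by
            rw [pvSkip, hb]; simp
          have htake : pvTake (pvOcc mask) (pvWidth mask) c
              = pvTake (pvOcc mask) (pvWidth mask) (c + 1) := by
            rw [pvTake, hb]; simp [hcw]
          have htge := pvTake_ge (pvOcc mask) (pvWidth mask) (c + 1)
          have hQ := (ih (c + 1) (by omega) (by omega)).2 c m M (by omega)
            (by
              intro x hx1 hx2
              have hxeq : x = c := by omega
              subst hxeq; exact hb)
            (pvRV_init mask c m M hC)
          rw [pvOuter, if_pos hcw, hskip]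
          rw [if_neg (by rw [htake]; omega)]
          rw [pvBRun.eq_def, if_pos hcw, hC]
          rw [htake]
          exact hQ
      · intro s lo hi hs hocc hrv
        cases hb : (pvOcc mask).getD c false with
        | true =>
          have hCsome : ∃ m M, pvColInfo mask c = some (m, M) := by
            have hcc := pvOcc_getD mask c hcw
            rw [hb] at hcc
            cases hC : pvColInfo mask c with
            | none => rw [hC] at hcc; simp at hcc
            | some p => exact ⟨p.1, p.2, by rw [← hC]⟩
          obtain ⟨m, M, hC⟩ := hCsome
          have htake : pvTake (pvOcc mask) (pvWidth mask) c
              = pvTake (pvOcc mask) (pvWidth mask) (c + 1) := by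
            rw [pvTake, hb]; simp [hcw]
          have hQ := (ih (c + 1) (by omega) (by omega)).2 s (min lo m) (max hi M) (by omega)
            (by
              intro x hx1 hx2
              rcases Nat.lt_or_ge x c with hx | hx
              · exact hocc x hx1 hx
              · have hxeq : x = c := by omega
                subst hxeq; exact hb)
            (pvRV_extend mask s c lo hi m M hrv hC)
          rw [pvBRun.eq_def, if_pos hcw, hC]
          rw [htake]
          exact hQ
        | false =>
          have hCnone : pvColInfo mask c = none := by
            have hcc := pvOcc_getD mask c hcw
            rw [hb] at hcc
            cases hC : pvColInfo mask c with
            | none => rfl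
            | some p => rw [hC] at hcc; simp at hcc
          have htake : pvTake (pvOcc mask) (pvWidth mask) c = c := by
            rw [pvTake, hb]; simp
          rw [pvBRun.eq_def, if_pos hcw, hCnone, htake]
          rw [pvSeg_eq mask s c lo hi hs hrv]
          rw [pvOuter_unocc mask c hcw hb]
          rw [(ih (c + 1) (by omega) (by omega)).1]
    · have hcw' : ¬ c < pvWidth mask := by omega
      constructor
      · rw [pvOuter, if_neg hcw', pvBRun.eq_def, if_neg hcw']
      · intro s lo hi hs hocc hrv
        have hceq : c = pvWidth mask := by omega
        have htake : pvTake (pvOcc mask) (pvWidth mask) c = c := by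
          rw [pvTake]; simp [hcw']
        rw [pvBRun.eq_def, if_neg hcw', htake]
        rw [pvOuter, if_neg hcw']
        rw [pvSeg_eq mask s c lo hi hs hrv]
        rw [hceq]

-- ===== VERDICT (by name: the statement is the Claim_ definition above) =====
theorem digit_bounds_py_spec : Claim_equal_digit_bounds_py := by
  intro mask _ _
  unfold Spec_digit_bounds_py
  have h := (pvMain mask (pvWidth mask) 0 (by omega) (by omega)).1
  rw [alt_eq_pvBRun]
  exact h
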